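-- pv_equiv track=rewrite | github.com/brandonlee503/COMP1001-Final-Project | test checkcombo.py | showDown
-- ===== SOURCE A (Python) =====
-- def showDown(p1Score=0, p2Score=0, p3Score=0, p4Score=0):
--     scoreList = [p1Score, p2Score, p3Score, p4Score]
--     theMax = scoreList.index(max(scoreList))
--     if( len(scoreList) != len(set(scoreList)) ): #If there is a tie
--         for i in range(len(scoreList)):
--             if(i != theMax and scoreList[i] == scoreList[theMax]):
--                 return None
--     return theMax
-- ===== SOURCE B (Python) =====
-- def showDown(p1Score=0, p2Score=0, p3Score=0, p4Score=0):
--     scores = [p1Score, p2Score, p3Score, p4Score]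
--     best = scores[0]
--     idx = 0
--     unique = True
--     for i in range(1, 4):
--         v = scores[i]
--         if v > best:
--             best, idx, unique = v, i, True
--         elif v == best:
--             unique = False
--     return idx if unique else None
-- ===== Notes on version B (the rewrite author's own statement) =====
-- stated objective: simpler
-- what changed: A's multi-pass body (max(), list.index(), a set-vs-list length tie pre-check, then a range loop re-scanning the list) is replaced by one left-to-right pass maintaining (best value, first best index, unique flag).
import Mathlib
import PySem

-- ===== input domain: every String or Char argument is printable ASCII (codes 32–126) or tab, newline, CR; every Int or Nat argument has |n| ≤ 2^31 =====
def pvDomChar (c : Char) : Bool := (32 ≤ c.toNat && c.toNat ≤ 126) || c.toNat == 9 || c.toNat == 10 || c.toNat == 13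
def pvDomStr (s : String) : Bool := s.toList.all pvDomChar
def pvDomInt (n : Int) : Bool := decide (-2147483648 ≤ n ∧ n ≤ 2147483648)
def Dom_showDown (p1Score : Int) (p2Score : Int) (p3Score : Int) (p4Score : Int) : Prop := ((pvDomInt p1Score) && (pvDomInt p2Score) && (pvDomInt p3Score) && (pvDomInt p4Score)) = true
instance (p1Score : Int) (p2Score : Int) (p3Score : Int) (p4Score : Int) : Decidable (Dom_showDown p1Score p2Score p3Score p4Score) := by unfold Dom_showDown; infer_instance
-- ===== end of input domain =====

-- B replaces A's multi-pass body (max, .index, set comparison, range loop) by a single pass keeping (best value, first best index, unique flag); same return value, different decomposition.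

-- ===== PORT A =====
-- the 'for i in range(len(scoreList))' loop with its early 'return None'
def showDownLoop (xs : List Int) (tm : Nat) : List Int → Option Int
  | [] => some (tm : Int)
  | i :: rest =>
    if i ≠ (tm : Int) ∧ PySem.List.pyGet? xs i = PySem.List.pyGet? xs (tm : Int) then none
    else showDownLoop xs tm rest

def showDown (p1Score : Int) (p2Score : Int) (p3Score : Int) (p4Score : Int) : Option Int :=
  let scoreList : List Int := [p1Score, p2Score, p3Score, p4Score]
  match PySem.List.max? scoreList (fun x => x) with
  | none => none  -- unreachable: scoreList is nonempty
  | some m =>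
    match PySem.List.index? scoreList m with
    | none => none  -- unreachable: the max is in the list
    | some theMax =>
      if scoreList.length ≠ (PySem.Set.ofList scoreList).length then
        showDownLoop scoreList theMax (PySem.List.pyRange 0 scoreList.length 1)
      else some (theMax : Int)

-- ===== PORT B =====
-- one fold step: strictly greater → new best/index, equal to best → not unique
def altStep : (Int × Int × Bool) → (Int × Int) → (Int × Int × Bool)
  | (best, idx, uniq), (i, v) =>
    if v > best then (v, i, true)
    else if v = best then (best, idx, false)
    else (best, idx, uniq)

def showDown_alt (p1Score : Int) (p2Score : Int) (p3Score : Int) (p4Score : Int) : Option Int :=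
  let st := List.foldl altStep (p1Score, 0, true) [(1, p2Score), (2, p3Score), (3, p4Score)]
  if st.2.2 then some st.2.1 else none

-- ===== PRECONDITION & SPEC =====
def Spec_showDown (p1Score : Int) (p2Score : Int) (p3Score : Int) (p4Score : Int) (out : Option Int) : Prop := out = showDown_alt p1Score p2Score p3Score p4Score
instance (p1Score : Int) (p2Score : Int) (p3Score : Int) (p4Score : Int) (out : Option Int) : Decidable (Spec_showDown p1Score p2Score p3Score p4Score out) := by unfold Spec_showDown; infer_instance

-- ===== CLAIM (what is proved, stated in full; the proofs are below) =====
def Claim_equal_showDown : Prop := ∀ (p1Score : Int) (p2Score : Int) (p3Score : Int) (p4Score : Int), Dom_showDown p1Score p2Score p3Score p4Score → Spec_showDown p1Score p2Score p3Score p4Score (showDown p1Score p2Score p3Score p4Score)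

-- ===== LEMMAS AND PROOFS =====

-- set(xs) (first occurrences, in order) is a sublist of xs
theorem ofList_sublist (xs : List Int) : (PySem.Set.ofList xs).Sublist xs := by
  induction xs using List.reverseRecOn with
  | nil => simp [PySem.Set.ofList]
  | append_singleton ys y ih =>
    rw [PySem.Set.ofList_append_singleton]
    unfold PySem.Set.add
    split
    · exact ih.trans (List.sublist_append_left ys [y])
    · exact List.Sublist.append ih (List.Sublist.refl [y])

theorem nodup_of_len_eq (xs : List Int) (h : xs.length = (PySem.Set.ofList xs).length) :
    xs.Nodup := by
  have hs := ofList_sublist xs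
  have : PySem.Set.ofList xs = xs := hs.eq_of_length h.symm
  rw [← this]; exact PySem.Set.nodup_ofList xs

-- A with the (redundant) set-based tie pre-check removed: it always runs the loop
def pvA (a b c d : Int) : Option Int :=
  match PySem.List.max? [a,b,c,d] (fun x => x) with
  | none => none
  | some m => match PySem.List.index? [a,b,c,d] m with
    | none => none
    | some tm => showDownLoop [a,b,c,d] tm (PySem.List.pyRange 0 4 1)

theorem loop_nodup (xs : List Int) (tm : Nat) (hnd : xs.Nodup) (h4 : xs.length = 4)
    (htm : tm < 4) : showDownLoop xs tm (PySem.List.pyRange 0 4 1) = some (tm : Int) := by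
  have hrange : PySem.List.pyRange 0 4 1 = [0,1,2,3] := by decide
  rw [hrange]
  have key : ∀ i : Nat, i < 4 → i ≠ tm → ¬ (PySem.List.pyGet? xs i = PySem.List.pyGet? xs (tm : Int)) := by
    intro i hi hne heq
    simp only [PySem.List.pyGet?_natCast] at heq
    rw [List.getElem?_eq_getElem (show i < xs.length by omega), List.getElem?_eq_getElem (show tm < xs.length by omega)] at heq
    exact hne ((List.Nodup.getElem_inj_iff hnd).mp (Option.some.inj heq))
  have k0 := key 0 (by omega); have k1 := key 1 (by omega)
  have k2 := key 2 (by omega); have k3 := key 3 (by omega)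
  simp only [showDownLoop]
  by_cases h0 : (0:Nat) = tm <;> by_cases h1 : (1:Nat) = tm <;>
    by_cases h2 : (2:Nat) = tm <;> by_cases h3 : (3:Nat) = tm <;>
    simp_all <;> omega

theorem A_eq_pvA (a b c d : Int) : showDown a b c d = pvA a b c d := by
  show (match PySem.List.max? [a,b,c,d] (fun x => x) with
  | none => none
  | some m =>
    match PySem.List.index? [a,b,c,d] m with
    | none => none
    | some theMax =>
      if ([a,b,c,d] : List Int).length ≠ (PySem.Set.ofList [a,b,c,d]).length then
        showDownLoop [a,b,c,d] theMax (PySem.List.pyRange 0 ([a,b,c,d] : List Int).length 1)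
      else some (theMax : Int)) = pvA a b c d
  unfold pvA
  cases hm : PySem.List.max? [a,b,c,d] (fun x => x) with
  | none => rfl
  | some m =>
    cases hi : PySem.List.index? [a,b,c,d] m with
    | none => simp only [hi]
    | some tm =>
      simp only [hi, List.length_cons, List.length_nil]
      by_cases hlen : (4:Nat) ≠ (PySem.Set.ofList [a,b,c,d]).length
      · rw [if_pos hlen]
        norm_num
      · rw [if_neg hlen]
        have hnd : ([a,b,c,d] : List Int).Nodup := by
          apply nodup_of_len_eq
          simpa using (not_not.mp hlen)
        obtain ⟨hk, -, -⟩ := PySem.List.getElem_of_index?_eq_some hi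
        exact (loop_nodup [a,b,c,d] tm hnd (by simp) (by simpa using hk)).symm

theorem max4 (a b c d : Int) : PySem.List.max? [a,b,c,d] (fun x => x) = some (max (max (max a b) c) d) := by
  simp only [PySem.List.max?]
  norm_num
  split_ifs <;> norm_num <;> split_ifs <;> norm_num <;> split_ifs <;> norm_num <;> omega

theorem idx4 (a b c d m : Int) : PySem.List.index? [a,b,c,d] m =
    (if a = m then some 0 else if b = m then some 1 else if c = m then some 2 else if d = m then some 3 else none) := by
  simp [List.idxOf?, List.findIdx?_cons]
  split_ifs <;> simp_all

set_option maxHeartbeats 1000000 in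
theorem pvA_eq_alt (a b c d : Int) : pvA a b c d = showDown_alt a b c d := by
  have hrange : PySem.List.pyRange 0 4 1 = [0,1,2,3] := by decide
  rcases lt_trichotomy a b with h1|h1|h1
  · -- b gt a
    rcases lt_trichotomy b c with h2|h2|h2
    · -- c gt b
      rcases lt_trichotomy c d with h3|h3|h3
      · -- d gt c
        have f1 : max (max (max a b) c) d = d := by omega
        have f2 : ¬ (a = d) := by omega
        have f3 : ¬ (b = d) := by omega
        have f4 : ¬ (c = d) := by omega
        have f5 : b > a := by omega
        have f6 : c > b := by omega
        have f7 : d > c := by omega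
        simp only [pvA, max4, idx4, hrange, f1, showDown_alt, List.foldl, altStep]
        simp [f2, f3, f4, f5, f6, f7, showDownLoop, PySem.List.pyGet?, PySem.List.pyIdx?]
      · -- d eq c
        have f1 : max (max (max a b) c) d = c := by omega
        have f2 : ¬ (a = c) := by omega
        have f3 : ¬ (b = c) := by omega
        have f4 : d = c := by omega
        have f5 : b > a := by omega
        have f6 : c > b := by omega
        have f7 : ¬ (d > c) := by omega
        simp only [pvA, max4, idx4, hrange, f1, showDown_alt, List.foldl, altStep]
        simp [f2, f3, f4, f5, f6, f7, showDownLoop, PySem.List.pyGet?, PySem.List.pyIdx?]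
      · -- d lt c
        have f1 : max (max (max a b) c) d = c := by omega
        have f2 : ¬ (a = c) := by omega
        have f3 : ¬ (b = c) := by omega
        have f4 : ¬ (d = c) := by omega
        have f5 : b > a := by omega
        have f6 : c > b := by omega
        have f7 : ¬ (d > c) := by omega
        simp only [pvA, max4, idx4, hrange, f1, showDown_alt, List.foldl, altStep]
        simp [f2, f3, f4, f5, f6, f7, showDownLoop, PySem.List.pyGet?, PySem.List.pyIdx?]
    · -- c eq b
      rcases lt_trichotomy b d with h3|h3|h3
      · -- d gt b
        have f1 : max (max (max a b) c) d = d := by omega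
        have f2 : ¬ (a = d) := by omega
        have f3 : ¬ (b = d) := by omega
        have f4 : ¬ (c = d) := by omega
        have f5 : b > a := by omega
        have f6 : ¬ (c > b) := by omega
        have f7 : c = b := by omega
        have f8 : d > b := by omega
        simp only [pvA, max4, idx4, hrange, f1, showDown_alt, List.foldl, altStep]
        simp [f2, f3, f4, f5, f6, f7, f8, showDownLoop, PySem.List.pyGet?, PySem.List.pyIdx?]
      · -- d eq b
        have f1 : max (max (max a b) c) d = b := by omega
        have f2 : ¬ (a = b) := by omega
        have f3 : c = b := by omega
        have f4 : d = b := by omega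
        have f5 : b > a := by omega
        have f6 : ¬ (c > b) := by omega
        have f7 : ¬ (d > b) := by omega
        simp only [pvA, max4, idx4, hrange, f1, showDown_alt, List.foldl, altStep]
        simp [f2, f3, f4, f5, f6, f7, showDownLoop, PySem.List.pyGet?, PySem.List.pyIdx?]
      · -- d lt b
        have f1 : max (max (max a b) c) d = b := by omega
        have f2 : ¬ (a = b) := by omega
        have f3 : c = b := by omega
        have f4 : ¬ (d = b) := by omega
        have f5 : b > a := by omega
        have f6 : ¬ (c > b) := by omega
        have f7 : ¬ (d > b) := by omega
        simp only [pvA, max4, idx4, hrange, f1, showDown_alt, List.foldl, altStep]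
        simp [f2, f3, f4, f5, f6, f7, showDownLoop, PySem.List.pyGet?, PySem.List.pyIdx?]
    · -- c lt b
      rcases lt_trichotomy b d with h3|h3|h3
      · -- d gt b
        have f1 : max (max (max a b) c) d = d := by omega
        have f2 : ¬ (a = d) := by omega
        have f3 : ¬ (b = d) := by omega
        have f4 : ¬ (c = d) := by omega
        have f5 : b > a := by omega
        have f6 : ¬ (c > b) := by omega
        have f7 : ¬ (c = b) := by omega
        have f8 : d > b := by omega
        simp only [pvA, max4, idx4, hrange, f1, showDown_alt, List.foldl, altStep]
        simp [f2, f3, f4, f5, f6, f7, f8, showDownLoop, PySem.List.pyGet?, PySem.List.pyIdx?]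
      · -- d eq b
        have f1 : max (max (max a b) c) d = b := by omega
        have f2 : ¬ (a = b) := by omega
        have f3 : ¬ (c = b) := by omega
        have f4 : d = b := by omega
        have f5 : b > a := by omega
        have f6 : ¬ (c > b) := by omega
        have f7 : ¬ (d > b) := by omega
        simp only [pvA, max4, idx4, hrange, f1, showDown_alt, List.foldl, altStep]
        simp [f2, f3, f4, f5, f6, f7, showDownLoop, PySem.List.pyGet?, PySem.List.pyIdx?]
      · -- d lt b
        have f1 : max (max (max a b) c) d = b := by omega
        have f2 : ¬ (a = b) := by omega
        have f3 : ¬ (c = b) := by omega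
        have f4 : ¬ (d = b) := by omega
        have f5 : b > a := by omega
        have f6 : ¬ (c > b) := by omega
        have f7 : ¬ (d > b) := by omega
        simp only [pvA, max4, idx4, hrange, f1, showDown_alt, List.foldl, altStep]
        simp [f2, f3, f4, f5, f6, f7, showDownLoop, PySem.List.pyGet?, PySem.List.pyIdx?]
  · -- b eq a
    rcases lt_trichotomy a c with h2|h2|h2
    · -- c gt a
      rcases lt_trichotomy c d with h3|h3|h3
      · -- d gt c
        have f1 : max (max (max a b) c) d = d := by omega
        have f2 : ¬ (a = d) := by omega
        have f3 : ¬ (b = d) := by omega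
        have f4 : ¬ (c = d) := by omega
        have f5 : ¬ (b > a) := by omega
        have f6 : b = a := by omega
        have f7 : c > a := by omega
        have f8 : d > c := by omega
        simp only [pvA, max4, idx4, hrange, f1, showDown_alt, List.foldl, altStep]
        simp [f2, f3, f4, f5, f6, f7, f8, showDownLoop, PySem.List.pyGet?, PySem.List.pyIdx?]
      · -- d eq c
        have f1 : max (max (max a b) c) d = c := by omega
        have f2 : ¬ (a = c) := by omega
        have f3 : ¬ (b = c) := by omega
        have f4 : d = c := by omega
        have f5 : ¬ (b > a) := by omega
        have f6 : b = a := by omega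
        have f7 : c > a := by omega
        have f8 : ¬ (d > c) := by omega
        simp only [pvA, max4, idx4, hrange, f1, showDown_alt, List.foldl, altStep]
        simp [f2, f3, f4, f5, f6, f7, f8, showDownLoop, PySem.List.pyGet?, PySem.List.pyIdx?]
      · -- d lt c
        have f1 : max (max (max a b) c) d = c := by omega
        have f2 : ¬ (a = c) := by omega
        have f3 : ¬ (b = c) := by omega
        have f4 : ¬ (d = c) := by omega
        have f5 : ¬ (b > a) := by omega
        have f6 : b = a := by omega
        have f7 : c > a := by omega
        have f8 : ¬ (d > c) := by omega
        simp only [pvA, max4, idx4, hrange, f1, showDown_alt, List.foldl, altStep]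
        simp [f2, f3, f4, f5, f6, f7, f8, showDownLoop, PySem.List.pyGet?, PySem.List.pyIdx?]
    · -- c eq a
      rcases lt_trichotomy a d with h3|h3|h3
      · -- d gt a
        have f1 : max (max (max a b) c) d = d := by omega
        have f2 : ¬ (a = d) := by omega
        have f3 : ¬ (b = d) := by omega
        have f4 : ¬ (c = d) := by omega
        have f5 : ¬ (b > a) := by omega
        have f6 : b = a := by omega
        have f7 : ¬ (c > a) := by omega
        have f8 : c = a := by omega
        have f9 : d > a := by omega
        simp only [pvA, max4, idx4, hrange, f1, showDown_alt, List.foldl, altStep]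
        simp [f2, f3, f4, f5, f6, f7, f8, f9, showDownLoop, PySem.List.pyGet?, PySem.List.pyIdx?]
      · -- d eq a
        have f1 : max (max (max a b) c) d = a := by omega
        have f2 : b = a := by omega
        have f3 : c = a := by omega
        have f4 : d = a := by omega
        have f5 : ¬ (b > a) := by omega
        have f6 : ¬ (c > a) := by omega
        have f7 : ¬ (d > a) := by omega
        simp only [pvA, max4, idx4, hrange, f1, showDown_alt, List.foldl, altStep]
        simp [f2, f3, f4, f5, f6, f7, showDownLoop, PySem.List.pyGet?, PySem.List.pyIdx?]
      · -- d lt a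
        have f1 : max (max (max a b) c) d = a := by omega
        have f2 : b = a := by omega
        have f3 : c = a := by omega
        have f4 : ¬ (d = a) := by omega
        have f5 : ¬ (b > a) := by omega
        have f6 : ¬ (c > a) := by omega
        have f7 : ¬ (d > a) := by omega
        simp only [pvA, max4, idx4, hrange, f1, showDown_alt, List.foldl, altStep]
        simp [f2, f3, f4, f5, f6, f7, showDownLoop, PySem.List.pyGet?, PySem.List.pyIdx?]
    · -- c lt a
      rcases lt_trichotomy a d with h3|h3|h3
      · -- d gt a
        have f1 : max (max (max a b) c) d = d := by omega
        have f2 : ¬ (a = d) := by omega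
        have f3 : ¬ (b = d) := by omega
        have f4 : ¬ (c = d) := by omega
        have f5 : ¬ (b > a) := by omega
        have f6 : b = a := by omega
        have f7 : ¬ (c > a) := by omega
        have f8 : ¬ (c = a) := by omega
        have f9 : d > a := by omega
        simp only [pvA, max4, idx4, hrange, f1, showDown_alt, List.foldl, altStep]
        simp [f2, f3, f4, f5, f6, f7, f8, f9, showDownLoop, PySem.List.pyGet?, PySem.List.pyIdx?]
      · -- d eq a
        have f1 : max (max (max a b) c) d = a := by omega
        have f2 : b = a := by omega
        have f3 : ¬ (c = a) := by omega
        have f4 : d = a := by omega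
        have f5 : ¬ (b > a) := by omega
        have f6 : ¬ (c > a) := by omega
        have f7 : ¬ (d > a) := by omega
        simp only [pvA, max4, idx4, hrange, f1, showDown_alt, List.foldl, altStep]
        simp [f2, f3, f4, f5, f6, f7, showDownLoop, PySem.List.pyGet?, PySem.List.pyIdx?]
      · -- d lt a
        have f1 : max (max (max a b) c) d = a := by omega
        have f2 : b = a := by omega
        have f3 : ¬ (c = a) := by omega
        have f4 : ¬ (d = a) := by omega
        have f5 : ¬ (b > a) := by omega
        have f6 : ¬ (c > a) := by omega
        have f7 : ¬ (d > a) := by omega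
        simp only [pvA, max4, idx4, hrange, f1, showDown_alt, List.foldl, altStep]
        simp [f2, f3, f4, f5, f6, f7, showDownLoop, PySem.List.pyGet?, PySem.List.pyIdx?]
  · -- b lt a
    rcases lt_trichotomy a c with h2|h2|h2
    · -- c gt a
      rcases lt_trichotomy c d with h3|h3|h3
      · -- d gt c
        have f1 : max (max (max a b) c) d = d := by omega
        have f2 : ¬ (a = d) := by omega
        have f3 : ¬ (b = d) := by omega
        have f4 : ¬ (c = d) := by omega
        have f5 : ¬ (b > a) := by omega
        have f6 : ¬ (b = a) := by omega
        have f7 : c > a := by omega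
        have f8 : d > c := by omega
        simp only [pvA, max4, idx4, hrange, f1, showDown_alt, List.foldl, altStep]
        simp [f2, f3, f4, f5, f6, f7, f8, showDownLoop, PySem.List.pyGet?, PySem.List.pyIdx?]
      · -- d eq c
        have f1 : max (max (max a b) c) d = c := by omega
        have f2 : ¬ (a = c) := by omega
        have f3 : ¬ (b = c) := by omega
        have f4 : d = c := by omega
        have f5 : ¬ (b > a) := by omega
        have f6 : ¬ (b = a) := by omega
        have f7 : c > a := by omega
        have f8 : ¬ (d > c) := by omega
        simp only [pvA, max4, idx4, hrange, f1, showDown_alt, List.foldl, altStep]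
        simp [f2, f3, f4, f5, f6, f7, f8, showDownLoop, PySem.List.pyGet?, PySem.List.pyIdx?]
      · -- d lt c
        have f1 : max (max (max a b) c) d = c := by omega
        have f2 : ¬ (a = c) := by omega
        have f3 : ¬ (b = c) := by omega
        have f4 : ¬ (d = c) := by omega
        have f5 : ¬ (b > a) := by omega
        have f6 : ¬ (b = a) := by omega
        have f7 : c > a := by omega
        have f8 : ¬ (d > c) := by omega
        simp only [pvA, max4, idx4, hrange, f1, showDown_alt, List.foldl, altStep]
        simp [f2, f3, f4, f5, f6, f7, f8, showDownLoop, PySem.List.pyGet?, PySem.List.pyIdx?]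
    · -- c eq a
      rcases lt_trichotomy a d with h3|h3|h3
      · -- d gt a
        have f1 : max (max (max a b) c) d = d := by omega
        have f2 : ¬ (a = d) := by omega
        have f3 : ¬ (b = d) := by omega
        have f4 : ¬ (c = d) := by omega
        have f5 : ¬ (b > a) := by omega
        have f6 : ¬ (b = a) := by omega
        have f7 : ¬ (c > a) := by omega
        have f8 : c = a := by omega
        have f9 : d > a := by omega
        simp only [pvA, max4, idx4, hrange, f1, showDown_alt, List.foldl, altStep]
        simp [f2, f3, f4, f5, f6, f7, f8, f9, showDownLoop, PySem.List.pyGet?, PySem.List.pyIdx?]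
      · -- d eq a
        have f1 : max (max (max a b) c) d = a := by omega
        have f2 : ¬ (b = a) := by omega
        have f3 : c = a := by omega
        have f4 : d = a := by omega
        have f5 : ¬ (b > a) := by omega
        have f6 : ¬ (c > a) := by omega
        have f7 : ¬ (d > a) := by omega
        simp only [pvA, max4, idx4, hrange, f1, showDown_alt, List.foldl, altStep]
        simp [f2, f3, f4, f5, f6, f7, showDownLoop, PySem.List.pyGet?, PySem.List.pyIdx?]
      · -- d lt a
        have f1 : max (max (max a b) c) d = a := by omega
        have f2 : ¬ (b = a) := by omega
        have f3 : c = a := by omega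
        have f4 : ¬ (d = a) := by omega
        have f5 : ¬ (b > a) := by omega
        have f6 : ¬ (c > a) := by omega
        have f7 : ¬ (d > a) := by omega
        simp only [pvA, max4, idx4, hrange, f1, showDown_alt, List.foldl, altStep]
        simp [f2, f3, f4, f5, f6, f7, showDownLoop, PySem.List.pyGet?, PySem.List.pyIdx?]
    · -- c lt a
      rcases lt_trichotomy a d with h3|h3|h3
      · -- d gt a
        have f1 : max (max (max a b) c) d = d := by omega
        have f2 : ¬ (a = d) := by omega
        have f3 : ¬ (b = d) := by omega
        have f4 : ¬ (c = d) := by omega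
        have f5 : ¬ (b > a) := by omega
        have f6 : ¬ (b = a) := by omega
        have f7 : ¬ (c > a) := by omega
        have f8 : ¬ (c = a) := by omega
        have f9 : d > a := by omega
        simp only [pvA, max4, idx4, hrange, f1, showDown_alt, List.foldl, altStep]
        simp [f2, f3, f4, f5, f6, f7, f8, f9, showDownLoop, PySem.List.pyGet?, PySem.List.pyIdx?]
      · -- d eq a
        have f1 : max (max (max a b) c) d = a := by omega
        have f2 : ¬ (b = a) := by omega
        have f3 : ¬ (c = a) := by omega
        have f4 : d = a := by omega
        have f5 : ¬ (b > a) := by omega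
        have f6 : ¬ (c > a) := by omega
        have f7 : ¬ (d > a) := by omega
        simp only [pvA, max4, idx4, hrange, f1, showDown_alt, List.foldl, altStep]
        simp [f2, f3, f4, f5, f6, f7, showDownLoop, PySem.List.pyGet?, PySem.List.pyIdx?]
      · -- d lt a
        have f1 : max (max (max a b) c) d = a := by omega
        have f2 : ¬ (b = a) := by omega
        have f3 : ¬ (c = a) := by omega
        have f4 : ¬ (d = a) := by omega
        have f5 : ¬ (b > a) := by omega
        have f6 : ¬ (c > a) := by omega
        have f7 : ¬ (d > a) := by omega
        simp only [pvA, max4, idx4, hrange, f1, showDown_alt, List.foldl, altStep]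
        simp [f2, f3, f4, f5, f6, f7, showDownLoop, PySem.List.pyGet?, PySem.List.pyIdx?]

-- ===== VERDICT (by name: the statement is the Claim_ definition above) =====
theorem showDown_spec : Claim_equal_showDown := by
  intro a b c d _
  unfold Spec_showDown
  rw [A_eq_pvA, pvA_eq_alt]
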